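-- pv_equiv track=rewrite | github.com/JafarAbbas33/make-audiobook | make_audiobook.py | get_chunks_count
-- ===== SOURCE A (Python) =====
-- MAX_SEN_COUNT_PER_CHUNK = 2
--
-- def get_text_chunk_for_processing(text):
--     joined_sen = ''
--     for sen in text.split('.'):
--         sen +=  '.'
--         if joined_sen.count('.') < MAX_SEN_COUNT_PER_CHUNK:
--             joined_sen += sen
--         else:
--             yield joined_sen.strip()
--             joined_sen = sen
--     if joined_sen.strip():
--         yield joined_sen.strip()
--
-- def get_chunks_count(text):
--     # Safest but extensive. Contributions welcomed!
--     c = 0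
--     for chunk in get_text_chunk_for_processing(text):
--         c += 1
--     return c
--
--     sen_count = text.count('.')
--     chunks_count = sen_count // MAX_SEN_COUNT_PER_CHUNK
--     if (sen_count % MAX_SEN_COUNT_PER_CHUNK):
--         chunks_count += 1
--     return chunks_count
-- ===== SOURCE B (Python) =====
-- MAX_SEN_COUNT_PER_CHUNK = 2
--
-- def get_chunks_count(text):
--     # Closed form: text.split('.') yields count+1 pieces; chunks absorb two
--     # sentence-ends each and the trailing chunk (which always contains a '.')
--     # is always emitted, so the answer is dots // 2 + 1.
--     return text.count('.') // MAX_SEN_COUNT_PER_CHUNK + 1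
-- ===== Notes on version B (the rewrite author's own statement) =====
-- stated objective: simpler
-- what changed: Replaces the generator-driven chunk enumeration and counting loop with the closed form text.count('.') // 2 + 1, using the fact that the trailing chunk always contains a '.' and is therefore always emitted.
import Mathlib
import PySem

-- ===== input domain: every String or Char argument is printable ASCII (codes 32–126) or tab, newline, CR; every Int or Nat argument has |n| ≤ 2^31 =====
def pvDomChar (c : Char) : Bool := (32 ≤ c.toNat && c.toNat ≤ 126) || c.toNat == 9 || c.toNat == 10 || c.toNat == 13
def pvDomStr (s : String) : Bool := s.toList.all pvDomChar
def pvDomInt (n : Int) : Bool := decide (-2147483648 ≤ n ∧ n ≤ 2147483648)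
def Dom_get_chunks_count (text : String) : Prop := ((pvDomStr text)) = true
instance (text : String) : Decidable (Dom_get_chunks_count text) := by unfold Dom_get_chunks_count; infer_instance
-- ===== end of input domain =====

-- B replaces A's generator-driven chunk enumeration with the closed form count('.') // 2 + 1 (simpler).


-- ===== PORT A =====
def MAX_SEN_COUNT_PER_CHUNK : Int := 2

-- one generator step of get_text_chunk_for_processing, fused with the consumer's counting
-- (the generator only feeds the counting loop, so its yields become `+ 1` on the counter)
def pvStepA (st : List Char × Int) (sen : List Char) : List Char × Int :=
  let sen := sen ++ ['.']
  if (PySem.Chars.count st.1 ['.'] : Int) < MAX_SEN_COUNT_PER_CHUNK then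
    (st.1 ++ sen, st.2)
  else
    (sen, st.2 + 1)

def get_chunks_count (text : String) : Int :=
  let r := (PySem.Chars.splitOn text.toList ['.']).foldl pvStepA ([], 0)
  if (PySem.Chars.strip r.1).isEmpty then r.2 else r.2 + 1

-- ===== PORT B =====
def get_chunks_count_alt (text : String) : Int :=
  PySem.Int.floordiv (PySem.Chars.count text.toList ['.'] : Int) MAX_SEN_COUNT_PER_CHUNK + 1

-- ===== PRECONDITION & SPEC =====
def Spec_get_chunks_count (text : String) (out : Int) : Prop := out = get_chunks_count_alt text
instance (text : String) (out : Int) : Decidable (Spec_get_chunks_count text out) := by unfold Spec_get_chunks_count; infer_instance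

-- ===== CLAIM (what is proved, stated in full; the proofs are below) =====
def Claim_equal_get_chunks_count : Prop := ∀ (text : String), Dom_get_chunks_count text → Spec_get_chunks_count text (get_chunks_count text)

-- ===== LEMMAS AND PROOFS =====

-- Chars.count with a single-character needle is List.count
theorem pv_count_go_single (fuel : Nat) : ∀ (l : List Char) (acc : Nat), l.length ≤ fuel →
    PySem.Chars.count.go ['.'] fuel l acc = acc + l.count '.' := by
  induction fuel with
  | zero =>
    intro l acc h
    have : l = [] := List.length_eq_zero_iff.mp (Nat.le_zero.mp h)
    subst this
    simp [PySem.Chars.count.go]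
  | succ n ih =>
    intro l acc h
    cases l with
    | nil => simp [PySem.Chars.count.go]
    | cons c rest =>
      simp only [PySem.Chars.count.go, List.isPrefixOf]
      have hlen : rest.length ≤ n := by simpa using h
      by_cases hc : ('.' : Char) = c
      · subst hc
        simp only [beq_self_eq_true, Bool.true_and, if_pos]
        rw [show (['.'] : List Char).length = 1 from rfl, List.drop_one, List.tail_cons,
          ih rest (acc + 1) hlen, List.count_cons]
        simp
        omega
      · have hb : (('.' : Char) == c) = false := by simpa using hc
        have hb2 : (c == '.') = false := by
          simp only [beq_eq_false_iff_ne, ne_eq]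
          exact fun h => hc h.symm
        simp only [hb, Bool.false_and, Bool.false_eq_true, if_false]
        rw [ih rest acc hlen, List.count_cons, hb2]
        rfl

theorem pv_count_single (l : List Char) : PySem.Chars.count l ['.'] = l.count '.' := by
  have := pv_count_go_single l.length l 0 le_rfl
  simpa [PySem.Chars.count] using this

-- simple reference splitter for sep = "."
def pvSplit : List Char → List (List Char)
  | [] => [[]]
  | c :: r => if c = '.' then [] :: pvSplit r else (pvSplit r).modifyHead (c :: ·)

theorem pvSplit_ne_nil (l : List Char) : pvSplit l ≠ [] := by
  cases l with
  | nil => simp [pvSplit]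
  | cons c r =>
    simp only [pvSplit]
    split_ifs
    · simp
    · cases h : pvSplit r with
      | nil => exact absurd h (pvSplit_ne_nil r)
      | cons a b => simp [List.modifyHead]

theorem pv_splitOn_go (fuel : Nat) : ∀ (l cur : List Char) (acc : List (List Char)), l.length < fuel →
    PySem.Chars.splitOn.go ['.'] fuel l cur acc
      = acc.reverse ++ (pvSplit l).modifyHead (cur.reverse ++ ·) := by
  induction fuel with
  | zero => intro l cur acc h; omega
  | succ n ih =>
    intro l cur acc h
    cases l with
    | nil => simp [PySem.Chars.splitOn.go, pvSplit, List.modifyHead]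
    | cons c rest =>
      simp only [PySem.Chars.splitOn.go, List.isPrefixOf]
      by_cases hc : ('.' : Char) = c
      · subst hc
        simp only [beq_self_eq_true, Bool.true_and, if_pos]
        rw [show (['.'] : List Char).length = 1 from rfl, List.drop_one, List.tail_cons,
          ih rest [] (List.reverse cur :: acc) (by simpa using h)]
        cases h' : pvSplit rest with
        | nil => exact absurd h' (pvSplit_ne_nil rest)
        | cons a b => simp [pvSplit, h', List.modifyHead]
      · have hb : (('.' : Char) == c) = false := by simpa using hc
        simp only [hb, Bool.false_and, Bool.false_eq_true, if_false]
        rw [ih rest (c :: cur) acc (by simpa using h)]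
        have hcn : ¬ c = '.' := fun h => hc h.symm
        simp only [pvSplit, if_neg hcn]
        cases h' : pvSplit rest with
        | nil => exact absurd h' (pvSplit_ne_nil rest)
        | cons a b => simp [List.modifyHead]

theorem pv_splitOn_eq (l : List Char) : PySem.Chars.splitOn l ['.'] = pvSplit l := by
  unfold PySem.Chars.splitOn
  rw [pv_splitOn_go (l.length + 1) l [] [] (Nat.lt_succ_self _)]
  cases h' : pvSplit l with
  | nil => exact absurd h' (pvSplit_ne_nil l)
  | cons a b => simp [List.modifyHead]

theorem pvSplit_length (l : List Char) : (pvSplit l).length = l.count '.' + 1 := by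
  induction l with
  | nil => simp [pvSplit]
  | cons c r ih =>
    simp only [pvSplit]
    split_ifs with hc
    · subst hc; simp [ih]
    · simp [List.length_modifyHead, ih, hc]

theorem pvSplit_dot_free (l : List Char) : ∀ p ∈ pvSplit l, ('.' : Char) ∉ p := by
  induction l with
  | nil => simp [pvSplit]
  | cons c r ih =>
    simp only [pvSplit]
    split_ifs with hc
    · intro p hp
      rcases List.mem_cons.mp hp with h | h
      · subst h; simp
      · exact ih p h
    · intro p hp
      cases h' : pvSplit r with
      | nil => exact absurd h' (pvSplit_ne_nil r)
      | cons a b =>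
        rw [h', List.modifyHead] at hp
        rcases List.mem_cons.mp hp with h | h
        · subst h
          intro hm
          rcases List.mem_cons.mp hm with h | h
          · exact hc h.symm
          · exact ih a (by rw [h']; exact List.mem_cons_self) h
        · exact ih p (by rw [h']; exact List.mem_cons_of_mem _ h)

-- the loop invariant: starting from a joined buffer holding 1 or 2 dots, the
-- counter advances by (m + d - 1) / 2 and the buffer keeps 1 or 2 dots
theorem pv_loop_inv (ps : List (List Char)) : ∀ (j : List Char) (c : Int),
    (∀ p ∈ ps, ('.' : Char) ∉ p) → (j.count '.' = 1 ∨ j.count '.' = 2) →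
    (ps.foldl pvStepA (j, c)).2 = c + ((ps.length + j.count '.' - 1) / 2 : Nat) ∧
    ((ps.foldl pvStepA (j, c)).1.count '.' = 1 ∨ (ps.foldl pvStepA (j, c)).1.count '.' = 2) := by
  induction ps with
  | nil =>
    intro j c _ hd
    constructor
    · rcases hd with h | h <;> simp [h]
    · simpa using hd
  | cons p rest ih =>
    intro j c hfree hd
    have hp : ('.' : Char) ∉ p := hfree p (List.mem_cons_self)
    have hpc : p.count '.' = 0 := List.count_eq_zero.mpr hp
    have hrest : ∀ q ∈ rest, ('.' : Char) ∉ q := fun q hq => hfree q (List.mem_cons_of_mem _ hq)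
    simp only [List.foldl_cons]
    rcases hd with h1 | h2
    · -- joined has one dot: absorb the sentence
      have hstep : pvStepA (j, c) p = (j ++ (p ++ ['.']), c) := by
        simp [pvStepA, pv_count_single, h1, MAX_SEN_COUNT_PER_CHUNK]
      rw [hstep]
      have hcnt : (j ++ (p ++ ['.'])).count '.' = 2 := by
        simp [List.count_append, h1, hpc]
      obtain ⟨hc', hd'⟩ := ih (j ++ (p ++ ['.'])) c hrest (Or.inr hcnt)
      refine ⟨?_, hd'⟩
      rw [hc', hcnt, h1]
      rw [show (rest.length + 2 - 1) / 2 = ((p :: rest).length + 1 - 1) / 2 from by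
        simp only [List.length_cons]; try omega]
    · -- joined is full: emit it, restart from the sentence
      have hstep : pvStepA (j, c) p = (p ++ ['.'], c + 1) := by
        simp [pvStepA, pv_count_single, h2, MAX_SEN_COUNT_PER_CHUNK]
      rw [hstep]
      have hcnt : (p ++ ['.']).count '.' = 1 := by simp [List.count_append, hpc]
      obtain ⟨hc', hd'⟩ := ih (p ++ ['.']) (c + 1) hrest (Or.inl hcnt)
      refine ⟨?_, hd'⟩
      rw [hc', hcnt, h2]
      rw [show ((p :: rest).length + 2 - 1) / 2 = (rest.length + 1 - 1) / 2 + 1 from by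
        simp only [List.length_cons]; try omega]
      push_cast
      ring

-- a buffer containing a dot survives strip
theorem pv_strip_ne_nil (l : List Char) (h : ('.' : Char) ∈ l) :
    (PySem.Chars.strip l).isEmpty = false := by
  simp only [PySem.Chars.strip, PySem.Chars.rstrip, PySem.Chars.lstrip]
  rw [List.isEmpty_eq_false_iff]
  intro hnil
  have h1 : List.dropWhile PySem.Chars.isspace ((List.dropWhile PySem.Chars.isspace l).reverse) = [] := by
    simpa using congrArg List.reverse hnil
  have h2 : ∀ x ∈ (List.dropWhile PySem.Chars.isspace l).reverse, PySem.Chars.isspace x = true :=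
    fun x hx => List.dropWhile_eq_nil_iff.mp h1 x hx
  by_cases hmem : ('.' : Char) ∈ List.dropWhile PySem.Chars.isspace l
  · have := h2 '.' (List.mem_reverse.mpr hmem)
    simp [PySem.Chars.isspace] at this
  · -- '.' was dropped by dropWhile, impossible since isspace '.' = false
    have hsplit : l.takeWhile PySem.Chars.isspace ++ l.dropWhile PySem.Chars.isspace = l :=
      List.takeWhile_append_dropWhile
    have : ('.' : Char) ∈ l.takeWhile PySem.Chars.isspace := by
      rcases List.mem_append.mp (hsplit ▸ h) with h' | h'
      · exact h'
      · exact absurd h' hmem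
    have := List.mem_takeWhile_imp this
    simp [PySem.Chars.isspace] at this

-- ===== VERDICT (by name: the statement is the Claim_ definition above) =====
theorem get_chunks_count_spec : Claim_equal_get_chunks_count := by
  intro text _
  unfold Spec_get_chunks_count get_chunks_count get_chunks_count_alt
  set cs := text.toList with hcs
  rw [pv_splitOn_eq, pv_count_single]
  cases hsp : pvSplit cs with
  | nil => exact absurd hsp (pvSplit_ne_nil cs)
  | cons p0 rest =>
    have hfree : ∀ p ∈ pvSplit cs, ('.' : Char) ∉ p := pvSplit_dot_free cs
    have hp0 : ('.' : Char) ∉ p0 := hfree p0 (by simp [hsp])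
    have hp0c : p0.count '.' = 0 := List.count_eq_zero.mpr hp0
    have hrest : ∀ q ∈ rest, ('.' : Char) ∉ q := fun q hq => hfree q (by simp [hsp, hq])
    simp only [List.foldl_cons]
    have hstep0 : pvStepA ([], 0) p0 = (p0 ++ ['.'], 0) := by
      simp [pvStepA, pv_count_single, MAX_SEN_COUNT_PER_CHUNK]
    rw [hstep0]
    have hc1 : (p0 ++ ['.']).count '.' = 1 := by simp [List.count_append, hp0c]
    obtain ⟨hc', hd'⟩ := pv_loop_inv rest (p0 ++ ['.']) 0 hrest (Or.inl hc1)
    have hmem : ('.' : Char) ∈ (rest.foldl pvStepA (p0 ++ ['.'], 0)).1 := by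
      rcases hd' with h | h <;> exact List.count_pos_iff.mp (by omega)
    rw [pv_strip_ne_nil _ hmem]
    simp only [Bool.false_eq_true, if_false]
    rw [hc', hc1]
    have hlen : cs.count '.' + 1 = rest.length + 1 := by
      have := pvSplit_length cs
      rw [hsp] at this
      simpa using this.symm
    have hcount : cs.count '.' = rest.length := by omega
    rw [hcount]
    have hfd : PySem.Int.floordiv (rest.length : Int) MAX_SEN_COUNT_PER_CHUNK = ((rest.length / 2 : Nat) : Int) := by
      show PySem.Int.floordiv (rest.length : Int) 2 = _
      rw [PySem.Int.floordiv.eq_1, Int.fdiv_eq_ediv]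
      simp only [show ((0:Int) ≤ 2 ∨ (2:Int) ∣ (rest.length : Int)) from Or.inl (by norm_num), if_pos]
      omega
    rw [hfd]
    norm_cast
    omega
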